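-- pv_equiv track=rewrite | github.com/apache/flagon | products/distill/distill/sessions/utils.py | chunk_by_idle_time
-- ===== SOURCE A (Python) =====
-- def chunk_by_idle_time(log, inactive_interval_s=60):
--     """
--     This function will divide/chunk sets which clientTime is
--     separated by idle time where idle time is defined as
--     period of inactivity that exceeds the specified
--     inactive_interval (in seconds). By default, the
--     interval is 60 seconds.
--
--     :param log: Userale log in the form of dictionary
--     :param inactive_interval_s: Threshold of inactivity (no logged activity) in seconds
--     :return: A dictionary that represent sets of logs separated by the idle time
--     """
--     separated_sets = {}
--     current_set = []
--     # Assume that clientTime is in the integer (unix time) which expressed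
--     # in milliseconds
--     difference_in_ms = inactive_interval_s * 1000
--
--     # Initialize the current timestamp
--     if len(log) > 0:
--         if "clientTime" in log[0]:
--             previous_timestamp = log[0]["clientTime"]
--         else:
--             previous_timestamp = log[0]["endTime"]
--
--     for item in log:
--         if "clientTime" in item:
--             current_timestamp = item["clientTime"]
--         else:
--             current_timestamp = item["endTime"]
--         if current_timestamp - previous_timestamp > difference_in_ms:
--             # If the current set is not empty, add it to the list of sets
--             if current_set:
--                 key = "time" + str(current_timestamp)
--                 separated_sets[key] = current_set
--                 current_set = []
--
--         # Add the current item to the current set and update the previous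
--         # timestamp
--         current_set.append(item)
--         previous_timestamp = current_timestamp
--
--     # Add the last set if it's not empty
--     if current_set:
--         key = "time" + str(current_timestamp)
--         separated_sets[key] = current_set
--     return separated_sets
-- ===== SOURCE B (Python) =====
-- def chunk_by_idle_time(log, inactive_interval_s=60):
--     """Two-pass decomposition: first build contiguous segments split at idle
--     gaps, then key each segment (non-final by next segment's first timestamp,
--     final by its own last timestamp)."""
--     if not log:
--         return {}
--
--     def ts(item):
--         return item["clientTime"] if "clientTime" in item else item["endTime"]
--
--     gap_ms = inactive_interval_s * 1000
--     segments = [[log[0]]]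
--     for prev, item in zip(log, log[1:]):
--         if ts(item) - ts(prev) > gap_ms:
--             segments.append([item])
--         else:
--             segments[-1].append(item)
--
--     result = {}
--     for seg, nxt in zip(segments, segments[1:]):
--         result["time" + str(ts(nxt[0]))] = seg
--     last = segments[-1]
--     result["time" + str(ts(last[-1]))] = last
--     return result
-- ===== Notes on version B (the rewrite author's own statement) =====
-- stated objective: alternative
-- what changed: Replaces A's single stateful loop (dict + current_set + previous/current timestamp juggling) by a two-pass decomposition: first build the list of gap-separated contiguous segments, then key each segment (non-final segments by the next segment's first timestamp, the final one by its own last timestamp) into the dict.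
import Mathlib
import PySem

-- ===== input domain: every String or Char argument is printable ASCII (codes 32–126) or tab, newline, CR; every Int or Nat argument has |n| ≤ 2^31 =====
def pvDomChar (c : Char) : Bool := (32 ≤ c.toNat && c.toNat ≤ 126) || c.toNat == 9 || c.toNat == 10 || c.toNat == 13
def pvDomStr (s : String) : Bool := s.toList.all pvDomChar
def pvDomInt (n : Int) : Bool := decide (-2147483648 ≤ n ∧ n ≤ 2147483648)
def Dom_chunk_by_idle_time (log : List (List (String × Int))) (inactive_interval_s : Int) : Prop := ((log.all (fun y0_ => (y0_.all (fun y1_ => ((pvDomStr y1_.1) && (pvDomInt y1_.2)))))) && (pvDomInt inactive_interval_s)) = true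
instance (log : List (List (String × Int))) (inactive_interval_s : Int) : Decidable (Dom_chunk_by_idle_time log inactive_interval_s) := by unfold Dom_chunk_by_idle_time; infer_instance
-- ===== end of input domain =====

-- B re-implements the chunking as two passes (build the gap-separated segments, then key
-- them) instead of A's single stateful loop; objective: alternative decomposition, same cost.

-- ===== PORT A =====
-- ts of an item: item["clientTime"] if "clientTime" in item else item["endTime"]
-- (the KeyError when neither key is present is excluded by Pre_; .getD 0 is unreachable there)
def pvTsA (item : List (String × Int)) : Int :=
  if (PySem.Dict.mk item).contains "clientTime" then
    ((PySem.Dict.mk item).get? "clientTime").getD 0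
  else
    ((PySem.Dict.mk item).get? "endTime").getD 0

def pvKeyA (t : Int) : String := "time" ++ PySem.Int.toStr t

-- one iteration of A's for-loop; state = (separated_sets, current_set, previous_timestamp, current_timestamp)
def pvStepA (diff : Int)
    (st : PySem.Dict String (List (List (String × Int))) × List (List (String × Int)) × Int × Int)
    (item : List (String × Int)) :
    PySem.Dict String (List (List (String × Int))) × List (List (String × Int)) × Int × Int :=
  let ct := pvTsA item
  let sc :=
    if ct - st.2.2.1 > diff then
      if st.2.1 ≠ [] then (st.1.insert (pvKeyA ct) st.2.1, ([] : List (List (String × Int))))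
      else (st.1, st.2.1)
    else (st.1, st.2.1)
  (sc.1, sc.2 ++ [item], ct, ct)

def chunk_by_idle_time (log : List (List (String × Int))) (inactive_interval_s : Int) :
    List (String × List (List (String × Int))) :=
  let diff := inactive_interval_s * 1000
  -- previous_timestamp is initialised only when len(log) > 0; the 0 for [] is never read
  let prev0 : Int := match log with | [] => 0 | first :: _ => pvTsA first
  let st := log.foldl (pvStepA diff) (PySem.Dict.empty, [], prev0, prev0)
  (if st.2.1 ≠ [] then st.1.insert (pvKeyA st.2.2.2) st.2.1 else st.1).items

-- ===== PORT B =====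
def pvTsB (item : List (String × Int)) : Int :=
  if (PySem.Dict.mk item).contains "clientTime" then
    ((PySem.Dict.mk item).get? "clientTime").getD 0
  else
    ((PySem.Dict.mk item).get? "endTime").getD 0

def pvKeyB (t : Int) : String := "time" ++ PySem.Int.toStr t

-- segments[-1].append(x)
def pvAppendLast (segs : List (List (List (String × Int)))) (x : List (String × Int)) :
    List (List (List (String × Int))) :=
  match segs with
  | [] => []
  | [s] => [s ++ [x]]
  | s :: rest => s :: pvAppendLast rest x

def chunk_by_idle_time_alt (log : List (List (String × Int))) (inactive_interval_s : Int) :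
    List (String × List (List (String × Int))) :=
  match log with
  | [] => []
  | first :: rest =>
    let gap := inactive_interval_s * 1000
    let segs := (log.zip rest).foldl
      (fun segs pr =>
        if pvTsB pr.2 - pvTsB pr.1 > gap then segs ++ [[pr.2]] else pvAppendLast segs pr.2)
      [[first]]
    let res := (segs.zip segs.tail).foldl
      (fun d pr => d.insert (pvKeyB (pvTsB (pr.2.headD []))) pr.1)
      (PySem.Dict.empty : PySem.Dict String (List (List (String × Int))))
    let last := segs.getLastD []
    (res.insert (pvKeyB (pvTsB (last.getLastD []))) last).items

-- ===== PRECONDITION & SPEC =====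
-- Pre_ excludes exactly the inputs where Python A raises KeyError: an item with
-- neither a "clientTime" nor an "endTime" key (B raises there too).
def Pre_chunk_by_idle_time (log : List (List (String × Int))) (inactive_interval_s : Int) : Prop :=
  ∀ item ∈ log, (PySem.Dict.mk item).contains "clientTime" = true ∨
                (PySem.Dict.mk item).contains "endTime" = true

instance (log : List (List (String × Int))) (inactive_interval_s : Int) :
    Decidable (Pre_chunk_by_idle_time log inactive_interval_s) := by
  unfold Pre_chunk_by_idle_time; infer_instance

def pvWitness_chunk_by_idle_time : (List (List (String × Int))) × Int :=
  ([[("clientTime", 0)], [("endTime", 70000)]], 60)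

def Spec_chunk_by_idle_time (log : List (List (String × Int))) (inactive_interval_s : Int) (out : List (String × List (List (String × Int)))) : Prop := out = chunk_by_idle_time_alt log inactive_interval_s
instance (log : List (List (String × Int))) (inactive_interval_s : Int) (out : List (String × List (List (String × Int)))) : Decidable (Spec_chunk_by_idle_time log inactive_interval_s out) := by unfold Spec_chunk_by_idle_time; infer_instance

-- ===== CLAIM (what is proved, stated in full; the proofs are below) =====
def Claim_equal_chunk_by_idle_time : Prop := ∀ (log : List (List (String × Int))) (inactive_interval_s : Int), Dom_chunk_by_idle_time log inactive_interval_s → Pre_chunk_by_idle_time log inactive_interval_s → Spec_chunk_by_idle_time log inactive_interval_s (chunk_by_idle_time log inactive_interval_s)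

-- ===== LEMMAS AND PROOFS =====

theorem pvTsB_eq : pvTsB = pvTsA := rfl
theorem pvKeyB_eq : pvKeyB = pvKeyA := rfl

-- Common reference decomposition both ports are reduced to:
-- pvSegs gap x xs = the gap-separated segments of (x :: xs);
-- pvKeyed d segs  = the keyed dictionary built from those segments.
def pvSegs (gap : Int) (x : List (String × Int)) :
    List (List (String × Int)) → List (List (List (String × Int)))
  | [] => [[x]]
  | y :: ys =>
    if pvTsA y - pvTsA x > gap then [x] :: pvSegs gap y ys
    else
      match pvSegs gap y ys with
      | [] => []
      | s :: rest => (x :: s) :: rest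

def pvGlue (s : List (List (String × Int))) :
    List (List (List (String × Int))) → List (List (List (String × Int)))
  | [] => []
  | t :: rest => (s ++ t.tail) :: rest

def pvKeyed (d : PySem.Dict String (List (List (String × Int)))) :
    List (List (List (String × Int))) → PySem.Dict String (List (List (String × Int)))
  | [] => d
  | [s] => d.insert (pvKeyA (pvTsA (s.getLastD []))) s
  | s :: t :: rest => pvKeyed (d.insert (pvKeyA (pvTsA (t.headD []))) s) (t :: rest)

-- what A's code does after its loop, resp. what B's code does after its segment pass
def pvFinA
    (st : PySem.Dict String (List (List (String × Int))) × List (List (String × Int)) × Int × Int) :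
    PySem.Dict String (List (List (String × Int))) :=
  if st.2.1 ≠ [] then st.1.insert (pvKeyA st.2.2.2) st.2.1 else st.1

def pvFinB (d : PySem.Dict String (List (List (String × Int))))
    (segs : List (List (List (String × Int)))) :
    PySem.Dict String (List (List (String × Int))) :=
  ((segs.zip segs.tail).foldl
      (fun d pr => d.insert (pvKeyB (pvTsB (pr.2.headD []))) pr.1) d).insert
    (pvKeyB (pvTsB ((segs.getLastD []).getLastD []))) (segs.getLastD [])

theorem pvSegs_shape (gap : Int) (xs : List (List (String × Int))) :
    ∀ x, ∃ r rest, pvSegs gap x xs = (x :: r) :: rest := by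
  induction xs with
  | nil => intro x; exact ⟨[], [], rfl⟩
  | cons y ys ih =>
    intro x
    by_cases h : pvTsA y - pvTsA x > gap
    · exact ⟨[], pvSegs gap y ys, by simp [pvSegs, h]⟩
    · obtain ⟨r, rest, hr⟩ := ih y
      exact ⟨y :: r, rest, by simp [pvSegs, h, hr]⟩

theorem pvGlue_single (gap : Int) (y : List (String × Int)) (ys : List (List (String × Int))) :
    pvGlue [y] (pvSegs gap y ys) = pvSegs gap y ys := by
  obtain ⟨r, rest, hr⟩ := pvSegs_shape gap ys y
  simp [hr, pvGlue]

theorem pvAppendLast_append (x : List (String × Int)) :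
    ∀ (segs0 : List (List (List (String × Int)))) (s : List (List (String × Int))),
      pvAppendLast (segs0 ++ [s]) x = segs0 ++ [s ++ [x]] := by
  intro segs0
  induction segs0 with
  | nil => intro s; rfl
  | cons a tl ih =>
    intro s
    cases tl with
    | nil => rfl
    | cons b tl' => simpa [pvAppendLast] using ih s

-- B's first fold (segment construction) computes pvSegs (up to pvGlue of the open segment).
theorem pvB_segs (gap : Int) (xs : List (List (String × Int))) :
    ∀ (x : List (String × Int)) (segs0 : List (List (List (String × Int))))
      (s : List (List (String × Int))),
      ((x :: xs).zip xs).foldl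
        (fun segs pr =>
          if pvTsB pr.2 - pvTsB pr.1 > gap then segs ++ [[pr.2]] else pvAppendLast segs pr.2)
        (segs0 ++ [s])
      = segs0 ++ pvGlue s (pvSegs gap x xs) := by
  induction xs with
  | nil => intro x segs0 s; simp [pvSegs, pvGlue]
  | cons y ys ih =>
    intro x segs0 s
    have hzip : ((x :: y :: ys).zip (y :: ys)) = (x, y) :: ((y :: ys).zip ys) := rfl
    rw [hzip, List.foldl_cons]
    by_cases h : pvTsA y - pvTsA x > gap
    · have hB : pvTsB y - pvTsB x > gap := h
      simp only [hB, if_pos]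
      have hih := ih y (segs0 ++ [s]) [y]
      rw [List.append_assoc] at hih ⊢
      rw [hih, pvGlue_single]
      simp [pvSegs, h, pvGlue]
    · have hB : ¬ (pvTsB y - pvTsB x > gap) := h
      simp only [hB, if_neg, not_false_iff]
      rw [pvAppendLast_append]
      rw [ih y segs0 (s ++ [y])]
      obtain ⟨r, rest, hr⟩ := pvSegs_shape gap ys y
      simp [pvSegs, h, hr, pvGlue]

-- B's second fold (keying) computes pvKeyed.
theorem pvB_keyed (segs1 : List (List (List (String × Int)))) :
    ∀ (s : List (List (String × Int))) (d : PySem.Dict String (List (List (String × Int)))),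
      pvFinB d (s :: segs1) = pvKeyed d (s :: segs1) := by
  induction segs1 with
  | nil =>
    intro s d
    unfold pvFinB
    rw [show ([s] : List (List (List (String × Int)))).getLastD [] = s from rfl]
    simp only [pvKeyB_eq, pvTsB_eq]
    simp [pvKeyed]
  | cons t rest ih =>
    intro s d
    unfold pvFinB
    rw [show ((s :: t :: rest).zip (s :: t :: rest).tail)
          = (s, t) :: ((t :: rest).zip (t :: rest).tail) from rfl, List.foldl_cons]
    rw [show (s :: t :: rest).getLastD ([] : List (List (String × Int)))
          = (t :: rest).getLastD [] from rfl]
    have hih := ih t (d.insert (pvKeyB (pvTsB (t.headD []))) s)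
    unfold pvFinB at hih
    rw [hih]
    simp only [pvKeyB_eq, pvTsB_eq]
    simp [pvKeyed]

-- A's loop computes pvKeyed ∘ pvGlue ∘ pvSegs (invariant: prev = ct = ts of last of cur).
theorem pvA_loop (diff : Int) (xs : List (List (String × Int))) :
    ∀ (sets : PySem.Dict String (List (List (String × Int))))
      (cur : List (List (String × Int))) (L : List (String × Int)),
      cur ≠ [] → cur.getLastD [] = L →
      pvFinA (xs.foldl (pvStepA diff) (sets, cur, pvTsA L, pvTsA L))
      = pvKeyed sets (pvGlue cur (pvSegs diff L xs)) := by
  induction xs with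
  | nil =>
    intro sets cur L hcur hL
    simp only [List.foldl_nil]
    have hL' : cur.getLast?.getD ([] : List (String × Int)) = L := by
      rw [← hL]; simp [List.getLastD_eq_getLast?]
    simp [pvFinA, hcur, pvSegs, pvGlue, pvKeyed, hL']
  | cons y ys ih =>
    intro sets cur L hcur hL
    rw [List.foldl_cons]
    by_cases h : pvTsA y - pvTsA L > diff
    · have hstep : pvStepA diff (sets, cur, pvTsA L, pvTsA L) y
          = (sets.insert (pvKeyA (pvTsA y)) cur, [y], pvTsA y, pvTsA y) := by
        simp only [pvStepA]
        split_ifs <;> simp_all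
      rw [hstep]
      rw [ih (sets.insert (pvKeyA (pvTsA y)) cur) [y] y (by simp) rfl, pvGlue_single]
      obtain ⟨r, rest, hr⟩ := pvSegs_shape diff ys y
      rw [show pvSegs diff L (y :: ys) = [L] :: pvSegs diff y ys from by
        simp only [pvSegs]; rw [if_pos h]]
      simp [pvGlue, hr, pvKeyed]
    · have hstep : pvStepA diff (sets, cur, pvTsA L, pvTsA L) y
          = (sets, cur ++ [y], pvTsA y, pvTsA y) := by
        simp only [pvStepA]
        split_ifs <;> simp_all
      rw [hstep]
      rw [ih sets (cur ++ [y]) y (by simp) (by simp)]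
      obtain ⟨r, rest, hr⟩ := pvSegs_shape diff ys y
      rw [show pvSegs diff L (y :: ys) = (L :: y :: r) :: rest from by
        simp only [pvSegs]; rw [if_neg h, hr]]
      simp [pvGlue, hr]

-- ===== VERDICT (by name: the statement is the Claim_ definition above) =====
theorem chunk_by_idle_time_spec : Claim_equal_chunk_by_idle_time := by
  intro log s _hdom _hpre
  unfold Spec_chunk_by_idle_time
  cases log with
  | nil => rfl
  | cons first rest =>
    have hstep0 : pvStepA (s * 1000) (PySem.Dict.empty, [], pvTsA first, pvTsA first) first
        = (PySem.Dict.empty, [first], pvTsA first, pvTsA first) := by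
      simp only [pvStepA]
      split_ifs <;> simp_all
    have hA := pvA_loop (s * 1000) rest PySem.Dict.empty [first] first (by simp) rfl
    have hAeq : chunk_by_idle_time (first :: rest) s
        = (pvKeyed PySem.Dict.empty (pvGlue [first] (pvSegs (s * 1000) first rest))).items := by
      show (pvFinA ((first :: rest).foldl (pvStepA (s * 1000))
              (PySem.Dict.empty, [], pvTsA first, pvTsA first))).items = _
      rw [List.foldl_cons, hstep0, hA]
    have hsegs := pvB_segs (s * 1000) rest first [] [first]
    rw [List.nil_append, List.nil_append] at hsegs
    obtain ⟨r, rest', hr⟩ := pvSegs_shape (s * 1000) rest first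
    have hBeq : chunk_by_idle_time_alt (first :: rest) s
        = (pvKeyed PySem.Dict.empty (pvSegs (s * 1000) first rest)).items := by
      show (pvFinB PySem.Dict.empty (((first :: rest).zip rest).foldl
              (fun segs pr =>
                if pvTsB pr.2 - pvTsB pr.1 > s * 1000 then segs ++ [[pr.2]]
                else pvAppendLast segs pr.2) [[first]])).items = _
      rw [hsegs, pvGlue_single, hr, pvB_keyed rest' (first :: r) PySem.Dict.empty, ← hr]
    rw [hAeq, hBeq, pvGlue_single]
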